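-- pv_equiv track=rewrite | github.com/openjason/catch_data | cfg2xls/cfg2xls_sw.py | getServiceGroupList
-- ===== SOURCE A (Python) =====
-- def getServiceGroupList(blocked_list, block_child_list,Gname,ServicePortList):
--     # 对服务（端口）明细进行解释，解析service-group明细，获取具体地址列表
--     #    ServicePortList = []
--     if Gname == 'ICMP':
--         ServicePortList.append('ICMP')
--         return ServicePortList
--     if Gname == 'Ping':
--         ServicePortList.append('Ping')
--         return ServicePortList
--
--     if Gname == '5000&ping':
--         Gname = Gname
--
--     for i in range(len(blocked_list)):
--         if 'ipv6' in blocked_list[i]:  # remove include "ipv6" string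
--             continue
--         tempStr1 = blocked_list[i]
--         if 'service-group' == tempStr1[:13]:
--             if '"' in Gname:
--                 Gname = Gname[1:len(Gname)-1]
--
--             if '"' in tempStr1:
--                 tempList1 = tempStr1.split('"')
-- #                tempGname = '"'+tempList1[1]+'"'
--                 tempGname = tempList1[1]
--             else:
--                 tempList1 = tempStr1.split()
-- #                print (tempList1)
--                 tempGname = tempList1[1]
--             if Gname == tempGname:
--                 tempList2 = block_child_list[i]
--                 for j in range(len(tempList2)):
--                     tempStr2 = tempList2[j].strip()
--                     if 'service-object' == tempStr2[:14]:
--                         tempGetSObject = tempStr2[15:len(tempStr2)]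
--                         ServicePortList.append(getServiceList(blocked_list, block_child_list,tempGetSObject))
--                     if 'service-group' == tempStr2[:13]:
--                         tempGetSObject = tempStr2[14:len(tempStr2)]
--                         tempGetSObject = tempGetSObject.strip()
--
--                         tempList3 = getServiceGroupList(blocked_list, block_child_list,tempGetSObject,ServicePortList)
-- #                        ServicePortList = ServicePortList + tempList3
--
--     return ServicePortList
--
-- def getServiceList(blocked_list, block_child_list,sname):
--     #获取具体服务对应的服务名和端口号
--     ServicePort = ''
--     for i in range(len(blocked_list)):
--         if 'ipv6' in blocked_list[i]:  # remove include "ipv6" string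
--             continue
--         tempStr1 = blocked_list[i]
--         if 'service-object' == tempStr1[:14]:
--             if sname == tempStr1[15:15+len(sname)] and tempStr1[15+len(sname):15+len(sname)+1]== ' ':
--                 ServicePort = tempStr1[15 + len(sname)+1:len(tempStr1)]
--                 break
--     return ServicePort
-- ===== SOURCE B (Python) =====
-- def getServiceGroupList(blocked_list, block_child_list, Gname, ServicePortList):
--     # Iterative pre-order expansion with an explicit LIFO work-stack instead of recursion.
--     # Mutates and returns the same ServicePortList object, like the original.
--     stack = [("group", Gname)]
--     while stack:
--         kind, name = stack.pop()
--         if kind == "object":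
--             ServicePortList.append(getServiceList(blocked_list, block_child_list, name))
--             continue
--         if name == "ICMP" or name == "Ping":
--             ServicePortList.append(name)
--             continue
--         tasks = []
--         cur = name
--         for i in range(len(blocked_list)):
--             line = blocked_list[i]
--             if "ipv6" in line:
--                 continue
--             if line[:13] != "service-group":
--                 continue
--             if '"' in cur:
--                 cur = cur[1:len(cur) - 1]
--             if '"' in line:
--                 gname = line.split('"')[1]
--             else:
--                 gname = line.split()[1]
--             if cur == gname:
--                 for child in block_child_list[i]:
--                     c = child.strip()
--                     if c[:14] == "service-object":
--                         tasks.append(("object", c[15:]))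
--                     if c[:13] == "service-group":
--                         tasks.append(("group", c[14:].strip()))
--         stack.extend(reversed(tasks))
--     return ServicePortList
--
--
-- def getServiceList(blocked_list, block_child_list, sname):
--     ServicePort = ''
--     for i in range(len(blocked_list)):
--         if 'ipv6' in blocked_list[i]:
--             continue
--         tempStr1 = blocked_list[i]
--         if 'service-object' == tempStr1[:14]:
--             if sname == tempStr1[15:15 + len(sname)] and tempStr1[15 + len(sname):15 + len(sname) + 1] == ' ':
--                 ServicePort = tempStr1[15 + len(sname) + 1:len(tempStr1)]
--                 break
--     return ServicePort
-- ===== Notes on version B (the rewrite author's own statement) =====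
-- stated objective: alternative
-- what changed: Replaces the pre-order recursion over nested service-groups with an iterative loop over an explicit LIFO work-stack of (object/group) tasks, pushing each matched block's children in reverse so they pop in source order; getServiceList is kept unchanged.
-- outside the precondition, e.g. on getServiceGroupList(['service-group A'], [], 'B', []): A returns [], B returns []; on getServiceGroupList(['service-group A'], [['service-group A']], 'B', []): A returns [], B returns []
import Mathlib
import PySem

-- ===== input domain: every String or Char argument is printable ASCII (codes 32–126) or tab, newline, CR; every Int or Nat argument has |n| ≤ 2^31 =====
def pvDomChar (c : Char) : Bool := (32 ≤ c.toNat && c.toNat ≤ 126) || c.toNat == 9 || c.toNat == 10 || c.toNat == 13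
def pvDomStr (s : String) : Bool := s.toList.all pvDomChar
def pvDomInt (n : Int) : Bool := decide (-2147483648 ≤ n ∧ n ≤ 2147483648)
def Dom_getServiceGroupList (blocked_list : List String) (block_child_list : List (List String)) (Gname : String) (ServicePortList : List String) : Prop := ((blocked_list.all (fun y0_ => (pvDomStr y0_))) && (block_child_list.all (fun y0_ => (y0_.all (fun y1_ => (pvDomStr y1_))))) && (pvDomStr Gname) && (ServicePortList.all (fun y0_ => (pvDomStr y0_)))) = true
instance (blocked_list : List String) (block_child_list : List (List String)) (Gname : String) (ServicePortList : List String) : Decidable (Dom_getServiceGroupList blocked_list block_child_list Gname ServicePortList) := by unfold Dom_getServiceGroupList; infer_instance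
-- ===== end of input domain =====

-- B rewrites the recursive pre-order group expansion as an iterative explicit LIFO work-stack loop
-- (objective: alternative decomposition, same cost); both Pythons mutate and return ServicePortList,
-- the equivalence proved here is about the return value (B performs the same mutation).

-- ===== PORT A =====
-- shared helper: literal port of getServiceList (its block_child_list parameter is unused by the Python)
def svcList (bl : List String) (sname : String) : String :=
  match bl with
  | [] => ""                                   -- loop ended without break: ServicePort = ''
  | s :: rest =>
    if PySem.Str.isIn "ipv6" s then svcList rest sname
    else if PySem.Str.slice s none (some 14) = "service-object" then
      if PySem.Str.slice s (some 15) (some (15 + PySem.Str.len sname)) = sname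
         ∧ PySem.Str.slice s (some (15 + PySem.Str.len sname)) (some (15 + PySem.Str.len sname + 1)) = " "
      then PySem.Str.slice s (some (15 + PySem.Str.len sname + 1)) (some (PySem.Str.len s))  -- break
      else svcList rest sname
    else svcList rest sname

-- shared one-line locals of both Pythons: Gname[1:len(Gname)-1] quote-stripping and the
-- tempGname extraction (split('"')[1] / split()[1]; the split() IndexError is excluded by Pre_)
def pvStrip1 (g : String) : String :=
  if PySem.Str.isIn "\"" g then PySem.Str.slice g (some 1) (some (PySem.Str.len g - 1)) else g

def pvGnameOf (s : String) : String :=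
  if PySem.Str.isIn "\"" s then ((PySem.Str.split? s "\"").getD []).getD 1 ""
  else (PySem.Str.split₀ s).getD 1 ""

-- A is a pre-order recursion; `fuel` only guards totality in Lean (Python raises RecursionError on
-- cyclic group references — those inputs are excluded by Pre_; on Pre_ the depth is ≤ |blocked_list|+1,
-- so fuel |blocked_list|+2 is never exhausted there).
mutual
-- the inner `for j in range(len(tempList2))` loop over the matched block's children
def pvAChildren (bl : List String) (bcl : List (List String)) (fuel : Nat)
    (kids : List String) (acc : List String) : List String :=
  match kids with
  | [] => acc
  | c :: rest =>
    pvAChildren bl bcl fuel rest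
      (if PySem.Str.slice (PySem.Str.strip c) none (some 13) = "service-group"
       then pvAGo bl bcl fuel
              (PySem.Str.strip (PySem.Str.slice (PySem.Str.strip c) (some 14) (some (PySem.Str.len (PySem.Str.strip c)))))
              (if PySem.Str.slice (PySem.Str.strip c) none (some 14) = "service-object"
               then acc ++ [svcList bl (PySem.Str.slice (PySem.Str.strip c) (some 15) (some (PySem.Str.len (PySem.Str.strip c))))]
               else acc)
       else (if PySem.Str.slice (PySem.Str.strip c) none (some 14) = "service-object"
             then acc ++ [svcList bl (PySem.Str.slice (PySem.Str.strip c) (some 15) (some (PySem.Str.len (PySem.Str.strip c))))]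
             else acc))
termination_by (fuel, 0, 1, kids.length)

-- the `for i in range(len(blocked_list))` loop; `g` is the mutable local Gname
def pvALoop (bl : List String) (bcl : List (List String)) (fuel : Nat)
    (rows : List (String × Nat)) (g : String) (acc : List String) : List String :=
  match rows with
  | [] => acc
  | (s, i) :: rest =>
    if PySem.Str.isIn "ipv6" s then pvALoop bl bcl fuel rest g acc
    else if PySem.Str.slice s none (some 13) = "service-group" then
      if pvStrip1 g = pvGnameOf s then
        -- block_child_list[i]; IndexError excluded by Pre_ (default unreachable there)
        pvALoop bl bcl fuel rest (pvStrip1 g) (pvAChildren bl bcl fuel ((PySem.List.pyGet? bcl (i : Int)).getD []) acc)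
      else pvALoop bl bcl fuel rest (pvStrip1 g) acc
    else pvALoop bl bcl fuel rest g acc
termination_by (fuel, 1, rows.length, 0)

def pvAGo (bl : List String) (bcl : List (List String)) (fuel : Nat)
    (g : String) (acc : List String) : List String :=
  match fuel with
  | 0 => acc                                   -- fuel guard only; unreachable on Pre_
  | f + 1 =>
    if g = "ICMP" then acc ++ ["ICMP"]
    else if g = "Ping" then acc ++ ["Ping"]
    -- the `if Gname == '5000&ping': Gname = Gname` statement is a no-op
    else pvALoop bl bcl f (bl.zipIdx) g acc
termination_by (fuel, 0, 0, 0)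
end

def getServiceGroupList (blocked_list : List String) (block_child_list : List (List String))
    (Gname : String) (ServicePortList : List String) : List String :=
  pvAGo blocked_list block_child_list (blocked_list.length + 2) Gname ServicePortList

-- ===== PORT B =====
inductive PTask where
  | obj : String → PTask
  | grp : String → PTask
deriving DecidableEq, Repr

-- the `for child in block_child_list[i]` loop of Source B, building `tasks`
def pvChildTasks (kids : List String) : List PTask :=
  match kids with
  | [] => []
  | c :: rest =>
    (if PySem.Str.slice (PySem.Str.strip c) none (some 14) = "service-object"
       then [PTask.obj (PySem.Str.slice (PySem.Str.strip c) (some 15) (some (PySem.Str.len (PySem.Str.strip c))))] else [])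
    ++ (if PySem.Str.slice (PySem.Str.strip c) none (some 13) = "service-group"
       then [PTask.grp (PySem.Str.strip (PySem.Str.slice (PySem.Str.strip c) (some 14) (some (PySem.Str.len (PySem.Str.strip c)))))] else [])
    ++ pvChildTasks rest

-- the `for i in range(len(blocked_list))` scan of Source B; `cur` is the mutable local copy of the name
def pvBScan (bcl : List (List String)) (rows : List (String × Nat)) (cur : String) : List PTask :=
  match rows with
  | [] => []
  | (s, i) :: rest =>
    if PySem.Str.isIn "ipv6" s then pvBScan bcl rest cur
    else if PySem.Str.slice s none (some 13) = "service-group" then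
      if pvStrip1 cur = pvGnameOf s then
        pvChildTasks ((PySem.List.pyGet? bcl (i : Int)).getD []) ++ pvBScan bcl rest (pvStrip1 cur)
      else pvBScan bcl rest (pvStrip1 cur)
    else pvBScan bcl rest cur

-- termination machinery for the stack loop (the port carries a per-task fuel, a totality guard only:
-- Source B's `while stack` simply runs to completion; on Pre_ the guard is never hit)
def pvWt (C : Nat) : Nat → Nat
  | 0 => 1
  | f + 1 => 1 + C * pvWt C f

def pvTaskW (C : Nat) : Nat × PTask → Nat
  | (_, PTask.obj _) => 1
  | (f, PTask.grp _) => pvWt C f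

def pvMaxKids (bcl : List (List String)) : Nat := bcl.foldr (fun l a => max l.length a) 0
def pvCbound (bl : List String) (bcl : List (List String)) : Nat := 2 * pvMaxKids bcl * bl.length + 1

theorem pvWt_pos (C f : Nat) : 1 ≤ pvWt C f := by
  cases f <;> simp [pvWt]

theorem pvChildTasks_length (kids : List String) : (pvChildTasks kids).length ≤ 2 * kids.length := by
  induction kids with
  | nil => simp [pvChildTasks]
  | cons c rest ih =>
    simp only [pvChildTasks, List.length_append, List.length_cons]
    split_ifs <;> simp <;> omega

theorem pvKids_le_maxKids (bcl : List (List String)) (i : Int) :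
    ((PySem.List.pyGet? bcl i).getD []).length ≤ pvMaxKids bcl := by
  cases h : PySem.List.pyGet? bcl i with
  | none => simp
  | some l =>
    have hm := PySem.List.mem_of_pyGet?_eq_some bcl h
    simp only [Option.getD_some]
    clear h
    induction bcl with
    | nil => cases hm
    | cons b t ih =>
      simp only [pvMaxKids, List.foldr_cons]
      rcases List.mem_cons.mp hm with rfl | hm'
      · exact le_max_left _ _
      · exact le_trans (ih hm') (le_max_right _ _)

theorem pvBScan_length (bcl : List (List String)) (rows : List (String × Nat)) (cur : String) :
    (pvBScan bcl rows cur).length ≤ 2 * pvMaxKids bcl * rows.length := by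
  induction rows generalizing cur with
  | nil => simp [pvBScan]
  | cons r rest ih =>
    obtain ⟨s, i⟩ := r
    rw [pvBScan]
    simp only [List.length_cons]
    split_ifs
    all_goals first
    | exact le_trans (ih _) (Nat.mul_le_mul_left _ (Nat.le_succ _))
    | · simp only [List.length_append]
        have h1 := pvChildTasks_length ((PySem.List.pyGet? bcl (i : Int)).getD [])
        have h2 := pvKids_le_maxKids bcl (i : Int)
        have h2' : (pvChildTasks ((PySem.List.pyGet? bcl (i : Int)).getD [])).length ≤ 2 * pvMaxKids bcl := by omega
        calc (pvChildTasks ((PySem.List.pyGet? bcl (i : Int)).getD [])).length + (pvBScan bcl rest _).length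
            ≤ 2 * pvMaxKids bcl + 2 * pvMaxKids bcl * rest.length := Nat.add_le_add h2' (ih _)
          _ = 2 * pvMaxKids bcl * (rest.length + 1) := by ring

theorem pvMapW_le (C f : Nat) (ts : List PTask) :
    ((ts.map (fun t => (f, t))).map (pvTaskW C)).sum ≤ ts.length * pvWt C f := by
  induction ts with
  | nil => simp
  | cons t rest ih =>
    simp only [List.map_cons, List.sum_cons, List.length_cons]
    have : pvTaskW C (f, t) ≤ pvWt C f := by
      cases t <;> simp [pvTaskW, pvWt_pos]
    calc pvTaskW C (f, t) + ((rest.map (fun t => (f, t))).map (pvTaskW C)).sum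
        ≤ pvWt C f + rest.length * pvWt C f := Nat.add_le_add this ih
      _ = (rest.length + 1) * pvWt C f := by ring

-- the `while stack` loop of Source B; stack head = top of stack; popping a group pushes the scanned
-- tasks in order (Source B pushes them reversed so they pop in source order)
def pvBLoop (bl : List String) (bcl : List (List String))
    (stack : List (Nat × PTask)) (acc : List String) : List String :=
  match stack with
  | [] => acc
  | (_, PTask.obj s) :: rest => pvBLoop bl bcl rest (acc ++ [svcList bl s])
  | (f, PTask.grp g) :: rest =>
    match f with
    | 0 => pvBLoop bl bcl rest acc             -- fuel guard only; unreachable on Pre_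
    | f' + 1 =>
      if g = "ICMP" ∨ g = "Ping" then pvBLoop bl bcl rest (acc ++ [g])
      else pvBLoop bl bcl (((pvBScan bcl (bl.zipIdx) g).map (fun t => (f', t))) ++ rest) acc
termination_by (stack.map (pvTaskW (pvCbound bl bcl))).sum
decreasing_by
  · simp [pvTaskW]
  · simp only [List.map_cons, List.sum_cons, pvTaskW, pvWt]; omega
  · simp only [List.map_cons, List.sum_cons, pvTaskW, Nat.succ_eq_add_one]
    have := pvWt_pos (pvCbound bl bcl) (f' + 1)
    omega
  · simp only [List.map_cons, List.sum_cons, List.map_append, List.sum_append, pvTaskW, pvWt]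
    have h1 := pvMapW_le (pvCbound bl bcl) f' (pvBScan bcl bl.zipIdx g)
    have h2 := pvBScan_length bcl bl.zipIdx g
    have h4 : (pvBScan bcl bl.zipIdx g).length * pvWt (pvCbound bl bcl) f'
        ≤ (2 * pvMaxKids bcl * bl.length) * pvWt (pvCbound bl bcl) f' := by
      apply Nat.mul_le_mul_right
      simpa [List.length_zipIdx] using h2
    have h5 : 2 * pvMaxKids bcl * bl.length * pvWt (pvCbound bl bcl) f'
        < pvCbound bl bcl * pvWt (pvCbound bl bcl) f' + 1 := by
      simp only [pvCbound]
      nlinarith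
    omega

def getServiceGroupList_alt (blocked_list : List String) (block_child_list : List (List String))
    (Gname : String) (ServicePortList : List String) : List String :=
  pvBLoop blocked_list block_child_list [(blocked_list.length + 2, PTask.grp Gname)] ServicePortList

-- ===== PRECONDITION & SPEC =====
-- Pre_-side helpers (independent of the ports): the group-reference graph
def pvQstripsGo : Nat → String → List String
  | 0, s => [s]
  | k + 1, s => s :: (if PySem.Str.isIn "\"" s then pvQstripsGo k (PySem.Str.slice s (some 1) (some (PySem.Str.len s - 1))) else [])

-- all quote-strip iterates of a name (every value the local Gname/cur can take)
def pvQstrips (g : String) : List String := pvQstripsGo (g.length + 1) g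

def pvIsGroupLine (s : String) : Bool :=
  !(PySem.Str.isIn "ipv6" s) && (PySem.Str.slice s none (some 13) == "service-group")

def pvGroupNames (bl : List String) : List String := (bl.filter pvIsGroupLine).map pvGnameOf

def pvChildGroupNames (kids : List String) : List String :=
  kids.filterMap (fun c =>
    let t := PySem.Str.strip c
    if PySem.Str.slice t none (some 13) == "service-group"
    then some (PySem.Str.strip (PySem.Str.slice t (some 14) (some (PySem.Str.len t)))) else none)

-- successors of a group name n: every quote-strip iterate of every child group name of every block named n
def pvSuccs (bl : List String) (bcl : List (List String)) (n : String) : List String :=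
  (bl.zipIdx.filter (fun p => pvIsGroupLine p.1 && pvGnameOf p.1 == n)).flatMap
    (fun p => (pvChildGroupNames ((PySem.List.pyGet? bcl (p.2 : Int)).getD [])).flatMap pvQstrips)

-- bounded-step transitive closure of pvSuccs from n (standard graph reachability, not a port simulation)
def pvReach (bl : List String) (bcl : List (List String)) (n : String) : List String :=
  (List.range ((pvGroupNames bl).length + 1)).foldl
    (fun S _ => PySem.Set.update S (S.flatMap (pvSuccs bl bcl)))
    (PySem.Set.ofList (pvSuccs bl bcl n))

def pvAcyclicB (bl : List String) (bcl : List (List String)) : Bool :=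
  (pvGroupNames bl).all (fun n => !(pvReach bl bcl n).contains n)

def pvLinesOk (bl : List String) (bcl : List (List String)) : Bool :=
  bl.zipIdx.all (fun p =>
    !(pvIsGroupLine p.1) ||
    (decide (p.2 < bcl.length) && (PySem.Str.isIn "\"" p.1 || decide (2 ≤ (PySem.Str.split₀ p.1).length))))

-- Pre_ excludes the inputs on which A raises: an IndexError from `split()[1]` on a quote-free
-- 'service-group' line with fewer than two tokens or from `block_child_list[i]` being out of range,
-- and a RecursionError on cyclic group references; the per-line child-list bound and the
-- acyclicity of the reference graph are conservative over-approximations (see cites).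
def Pre_getServiceGroupList (blocked_list : List String) (block_child_list : List (List String)) (Gname : String) (ServicePortList : List String) : Prop :=
  Gname = "ICMP" ∨ Gname = "Ping" ∨
  (pvLinesOk blocked_list block_child_list = true ∧ pvAcyclicB blocked_list block_child_list = true)
instance (blocked_list : List String) (block_child_list : List (List String)) (Gname : String) (ServicePortList : List String) : Decidable (Pre_getServiceGroupList blocked_list block_child_list Gname ServicePortList) := by unfold Pre_getServiceGroupList; infer_instance

def pvWitness_getServiceGroupList : List String × List (List String) × String × List String :=
  (["service-group GA"], [["service-object SO1", "service-group GB"]], "GA", [])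

def Spec_getServiceGroupList (blocked_list : List String) (block_child_list : List (List String)) (Gname : String) (ServicePortList : List String) (out : List String) : Prop := out = getServiceGroupList_alt blocked_list block_child_list Gname ServicePortList
instance (blocked_list : List String) (block_child_list : List (List String)) (Gname : String) (ServicePortList : List String) (out : List String) : Decidable (Spec_getServiceGroupList blocked_list block_child_list Gname ServicePortList out) := by unfold Spec_getServiceGroupList; infer_instance

-- ===== CLAIM (what is proved, stated in full; the proofs are below) =====
def Claim_equal_getServiceGroupList : Prop := ∀ (blocked_list : List String) (block_child_list : List (List String)) (Gname : String) (ServicePortList : List String), Dom_getServiceGroupList blocked_list block_child_list Gname ServicePortList → Pre_getServiceGroupList blocked_list block_child_list Gname ServicePortList → Spec_getServiceGroupList blocked_list block_child_list Gname ServicePortList (getServiceGroupList blocked_list block_child_list Gname ServicePortList)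

-- ===== LEMMAS AND PROOFS =====
-- the sequential execution, by A's recursion, of a list of pending tasks at call fuel f
def pvExecT (bl : List String) (bcl : List (List String)) (f : Nat)
    (ts : List PTask) (acc : List String) : List String :=
  ts.foldl (fun a t => match t with
    | PTask.obj s => a ++ [svcList bl s]
    | PTask.grp g => pvAGo bl bcl f g a) acc

theorem pvExecT_append (bl : List String) (bcl : List (List String)) (f : Nat)
    (ts1 ts2 : List PTask) (acc : List String) :
    pvExecT bl bcl f (ts1 ++ ts2) acc = pvExecT bl bcl f ts2 (pvExecT bl bcl f ts1 acc) := by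
  simp [pvExecT]

-- B's task list for one child block, executed by A's recursion, is A's inner child loop
theorem pvChildExec (bl : List String) (bcl : List (List String)) (f : Nat)
    (kids : List String) (acc : List String) :
    pvExecT bl bcl f (pvChildTasks kids) acc = pvAChildren bl bcl f kids acc := by
  induction kids generalizing acc with
  | nil => simp [pvChildTasks, pvAChildren, pvExecT]
  | cons c rest ih =>
    rw [pvChildTasks, pvAChildren]
    rw [pvExecT_append, pvExecT_append]
    rw [ih]
    split_ifs <;> simp [pvExecT]

-- B's scan result, executed by A's recursion, is A's main loop
theorem pvScanExec (bl : List String) (bcl : List (List String)) (f : Nat)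
    (rows : List (String × Nat)) (cur : String) (acc : List String) :
    pvExecT bl bcl f (pvBScan bcl rows cur) acc = pvALoop bl bcl f rows cur acc := by
  induction rows generalizing cur acc with
  | nil => simp [pvBScan, pvALoop, pvExecT]
  | cons r rest ih =>
    obtain ⟨s, i⟩ := r
    rw [pvBScan, pvALoop]
    split_ifs with h1 h2 h3
    · exact ih cur acc
    · rw [pvExecT_append, pvChildExec]; exact ih _ _
    · exact ih _ acc
    · exact ih cur acc

-- flushing a layer of same-fuel tasks off the stack = executing them by A's recursion
theorem pvFlush (bl : List String) (bcl : List (List String)) (f : Nat)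
    (hP : ∀ g rest acc, pvBLoop bl bcl ((f, PTask.grp g) :: rest) acc = pvBLoop bl bcl rest (pvAGo bl bcl f g acc))
    (ts : List PTask) (rest : List (Nat × PTask)) (acc : List String) :
    pvBLoop bl bcl (ts.map (fun t => (f, t)) ++ rest) acc = pvBLoop bl bcl rest (pvExecT bl bcl f ts acc) := by
  induction ts generalizing acc with
  | nil => simp [pvExecT]
  | cons t ts' ih =>
    cases t with
    | obj s =>
      rw [List.map_cons, List.cons_append, pvBLoop]
      rw [ih]
      simp [pvExecT]
    | grp g =>
      rw [List.map_cons, List.cons_append, hP]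
      rw [ih]
      simp [pvExecT]

-- key simulation lemma: popping a group task runs A's recursive call on it
theorem pvGrpStep (bl : List String) (bcl : List (List String)) :
    ∀ (f : Nat) (g : String) (rest : List (Nat × PTask)) (acc : List String),
    pvBLoop bl bcl ((f, PTask.grp g) :: rest) acc = pvBLoop bl bcl rest (pvAGo bl bcl f g acc) := by
  intro f
  induction f with
  | zero => intro g rest acc; rw [pvBLoop, pvAGo]
  | succ f' ih =>
    intro g rest acc
    rw [pvBLoop, pvAGo]
    by_cases hI : g = "ICMP"
    · simp [hI]
    · by_cases hP : g = "Ping"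
      · simp [hP]
      · rw [if_neg hI, if_neg hP, if_neg (by tauto : ¬ (g = "ICMP" ∨ g = "Ping"))]
        rw [pvFlush bl bcl f' ih, pvScanExec]

theorem pvBLoop_nil (bl : List String) (bcl : List (List String)) (acc : List String) :
    pvBLoop bl bcl [] acc = acc := by rw [pvBLoop]

-- ===== VERDICT (by name: the statement is the Claim_ definition above) =====
theorem getServiceGroupList_spec : Claim_equal_getServiceGroupList := by
  unfold Claim_equal_getServiceGroupList
  intro bl bcl g spl _ _
  unfold Spec_getServiceGroupList getServiceGroupList getServiceGroupList_alt
  rw [pvGrpStep, pvBLoop_nil]
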